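-- pv_equiv track=rewrite | github.com/kentonbandy/routesaver | workdata_gui.py | add_char
-- ===== SOURCE A (Python) =====
-- def add_char(s, c, ind_lst):
--     newstring = ""
--     for n in range(len(s)):
--         if n in ind_lst:
--             newstring += s[n] + c
--         else:
--             newstring += s[n]
--     return newstring
-- ===== SOURCE B (Python) =====
-- def add_char(s, c, ind_lst):
--     idxs = sorted({i for i in ind_lst if 0 <= i < len(s)})
--     pieces = []
--     prev = 0
--     for i in idxs:
--         pieces.append(s[prev:i + 1])
--         pieces.append(c)
--         prev = i + 1
--     pieces.append(s[prev:])
--     return ''.join(pieces)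
-- ===== Notes on version B (the rewrite author's own statement) =====
-- stated objective: faster
-- what changed: Instead of scanning every character and testing list membership, B sorts the deduplicated in-range indices once and concatenates whole slices between insertion points.
import Mathlib
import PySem

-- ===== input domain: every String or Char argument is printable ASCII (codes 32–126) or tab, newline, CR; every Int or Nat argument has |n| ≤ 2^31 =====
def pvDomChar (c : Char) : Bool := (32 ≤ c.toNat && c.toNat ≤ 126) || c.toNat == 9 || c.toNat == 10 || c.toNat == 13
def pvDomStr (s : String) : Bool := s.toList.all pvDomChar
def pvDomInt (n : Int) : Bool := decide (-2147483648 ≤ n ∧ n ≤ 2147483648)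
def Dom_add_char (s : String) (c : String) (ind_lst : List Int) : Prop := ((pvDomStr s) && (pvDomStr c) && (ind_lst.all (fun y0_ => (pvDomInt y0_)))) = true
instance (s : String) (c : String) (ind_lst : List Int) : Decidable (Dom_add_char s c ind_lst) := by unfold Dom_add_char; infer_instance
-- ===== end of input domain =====

-- B replaces A's per-character membership scan by one sorted pass over the deduplicated
-- in-range insertion indices, concatenating whole slices between insertion points (faster).


-- ===== PORT A =====
-- for n in range(len(s)): newstring += s[n] + c  if n in ind_lst else s[n]
-- (s[n] ported as pyGetD, exact here since n is always in range)
def add_char (s : String) (c : String) (ind_lst : List Int) : String :=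
  String.ofList
    ((PySem.List.pyRange 0 (PySem.Str.len s) 1).foldl
      (fun (newstring : List Char) n =>
        if ind_lst.contains n then
          newstring ++ (PySem.List.pyGetD s.toList n ' ' :: c.toList)
        else
          newstring ++ [PySem.List.pyGetD s.toList n ' '])
      [])

-- ===== PORT B =====
-- idxs = sorted({i for i in ind_lst if 0 <= i < len(s)}); slice segments between insertion points
def add_char_alt (s : String) (c : String) (ind_lst : List Int) : String :=
  let cs := s.toList
  let idxs := PySem.List.sorted
      (PySem.Set.ofList (ind_lst.filter (fun i => decide (0 ≤ i ∧ i < (cs.length : Int)))))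
      (fun x => x) false
  let st := idxs.foldl
      (fun (st : List Char × Int) i =>
        (st.1 ++ PySem.List.slice cs (some st.2) (some (i + 1)) ++ c.toList, i + 1))
      ([], 0)
  String.ofList (st.1 ++ PySem.List.slice cs (some st.2) none)

-- ===== PRECONDITION & SPEC =====
def Spec_add_char (s : String) (c : String) (ind_lst : List Int) (out : String) : Prop := out = add_char_alt s c ind_lst
instance (s : String) (c : String) (ind_lst : List Int) (out : String) : Decidable (Spec_add_char s c ind_lst out) := by unfold Spec_add_char; infer_instance

-- ===== CLAIM (what is proved, stated in full; the proofs are below) =====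
def Claim_equal_add_char : Prop := ∀ (s : String) (c : String) (ind_lst : List Int), Dom_add_char s c ind_lst → Spec_add_char s c ind_lst (add_char s c ind_lst)

-- ===== LEMMAS AND PROOFS =====

-- reference shape: walk the characters, after position n insert c when P n
def pvRef (c : List Char) (P : Int → Bool) : Nat → List Char → List Char
  | _, [] => []
  | n, ch :: rest => ch :: (if P (n : Int) then c else []) ++ pvRef c P (n + 1) rest

theorem pvRef_congr (c : List Char) (P Q : Int → Bool) (n : Nat) (l : List Char)
    (h : ∀ m : Nat, n ≤ m → m < n + l.length → P (m : Int) = Q (m : Int)) :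
    pvRef c P n l = pvRef c Q n l := by
  induction l generalizing n with
  | nil => rfl
  | cons ch rest ih =>
      simp only [pvRef]
      rw [h n le_rfl (by simp), ih (n + 1) (fun m h1 h2 => h m (by omega) (by simp; omega))]

theorem pvRef_no_hits (c : List Char) (P : Int → Bool) (n : Nat) (l : List Char)
    (h : ∀ m : Nat, n ≤ m → m < n + l.length → P (m : Int) = false) :
    pvRef c P n l = l := by
  induction l generalizing n with
  | nil => rfl
  | cons ch rest ih =>
      simp only [pvRef, h n le_rfl (by simp),
        ih (n + 1) (fun m h1 h2 => h m (by omega) (by simp; omega))]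
      simp

theorem pvRef_append (c : List Char) (P : Int → Bool) (n : Nat) (l1 l2 : List Char) :
    pvRef c P n (l1 ++ l2) = pvRef c P n l1 ++ pvRef c P (n + l1.length) l2 := by
  induction l1 generalizing n with
  | nil => simp [pvRef]
  | cons ch rest ih =>
      simp only [List.cons_append, pvRef, ih (n + 1), List.length_cons]
      have h : n + 1 + rest.length = n + (rest.length + 1) := by omega
      rw [h]
      simp [List.append_assoc]

-- A's loop over range(len(s)) computes pvRef
theorem pvA_loop (cs c : List Char) (P : Int → Bool) :
    ∀ (k n : Nat) (acc : List Char), n + k = cs.length →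
    (PySem.List.pyRange (n : Int) (cs.length : Int) 1).foldl
      (fun (newstring : List Char) j =>
        if P j then newstring ++ (PySem.List.pyGetD cs j ' ' :: c)
        else newstring ++ [PySem.List.pyGetD cs j ' ']) acc
    = acc ++ pvRef c P n (cs.drop n) := by
  intro k
  induction k with
  | zero =>
      intro n acc h
      rw [PySem.List.pyRange_one_eq_nil (by omega)]
      rw [List.drop_of_length_le (by omega)]
      simp [pvRef]
  | succ k ih =>
      intro n acc h
      have hn : n < cs.length := by omega
      rw [PySem.List.pyRange_one_cons (by exact_mod_cast hn)]
      have hd : cs.drop n = cs[n] :: cs.drop (n + 1) :=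
        List.drop_eq_getElem_cons hn
      have hget : PySem.List.pyGetD cs (n : Int) ' ' = cs[n] := by
        rw [PySem.List.pyGetD_natCast]
        exact List.getD_eq_getElem _ _ hn
      have hcast : ((n : Int) + 1) = ((n + 1 : Nat) : Int) := by push_cast; ring
      simp only [List.foldl_cons, hcast, ih (n + 1) _ (by omega)]
      rw [hd]
      simp only [pvRef, hget]
      by_cases hP : P (n : Int) <;> simp [hP]

-- B's segment loop over a sorted index list computes pvRef
theorem pvB_loop (cs c : List Char) :
    ∀ (idxs : List Int) (p : Nat) (acc : List Char),
    idxs.Pairwise (· < ·) →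
    (∀ i ∈ idxs, (p : Int) ≤ i ∧ i < (cs.length : Int)) →
    (let st := idxs.foldl
        (fun (st : List Char × Int) i =>
          (st.1 ++ PySem.List.slice cs (some st.2) (some (i + 1)) ++ c, i + 1))
        (acc, (p : Int))
     st.1 ++ PySem.List.slice cs (some st.2) none)
    = acc ++ pvRef c (fun n => decide (n ∈ idxs)) p (cs.drop p) := by
  intro idxs
  induction idxs with
  | nil =>
      intro p acc _ _
      simp only [List.foldl_nil]
      rw [PySem.List.slice_from_natCast]
      rw [pvRef_no_hits c _ p (cs.drop p) (by intro m _ _; simp)]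
  | cons i rest ih =>
      intro p acc hpw hb
      have hi := hb i (by simp)
      have hrestgt : ∀ j ∈ rest, i < j := by
        intro j hj; exact (List.pairwise_cons.mp hpw).1 j hj
      have hiN : i = ((i.toNat : Nat) : Int) := by omega
      set iN := i.toNat with hiNdef
      have hpi : p ≤ iN := by omega
      have hilen : iN < cs.length := by omega
      simp only [List.foldl_cons]
      have hcast1 : i + 1 = ((iN + 1 : Nat) : Int) := by omega
      have step := ih (iN + 1)
        (acc ++ PySem.List.slice cs (some (p : Int)) (some (i + 1)) ++ c)
        (List.pairwise_cons.mp hpw).2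
        (by intro j hj; exact ⟨by have := hrestgt j hj; omega, (hb j (by simp [hj])).2⟩)
      simp only [hcast1] at step ⊢
      rw [step]
      -- now assemble the right-hand side
      have hslice : PySem.List.slice cs (some (p : Int)) (some ((iN + 1 : Nat) : Int))
          = (cs.drop p).take (iN + 1 - p) := PySem.List.slice_natCast cs p (iN + 1)
      have hdropsplit : cs.drop p = (cs.drop p).take (iN + 1 - p) ++ cs.drop (iN + 1) := by
        conv_lhs => rw [← List.take_append_drop (iN + 1 - p) (cs.drop p)]
        rw [List.drop_drop]
        have h2 : p + (iN + 1 - p) = iN + 1 := by omega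
        rw [h2]
      have hlenseg : ((cs.drop p).take (iN + 1 - p)).length = iN + 1 - p := by
        rw [List.length_take, List.length_drop]
        omega
      conv_rhs => rw [hdropsplit]
      rw [pvRef_append, hlenseg]
      have hplen : p + (iN + 1 - p) = iN + 1 := by omega
      rw [hplen]
      -- the first segment : positions p..iN, single hit at iN
      have hseg : pvRef c (fun n => decide (n ∈ i :: rest)) p ((cs.drop p).take (iN + 1 - p))
          = (cs.drop p).take (iN + 1 - p) ++ c := by
        have hsplit2 : (cs.drop p).take (iN + 1 - p)
            = (cs.drop p).take (iN - p) ++ [cs[iN]] := by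
          have h1 : iN + 1 - p = (iN - p) + 1 := by omega
          rw [h1, List.take_add_one]
          have hgd : (cs.drop p)[iN - p]? = some cs[iN] := by
            rw [List.getElem?_drop]
            have hidx : p + (iN - p) = iN := by omega
            rw [hidx]
            exact List.getElem?_eq_getElem (by omega)
          simp [hgd]
        rw [hsplit2, pvRef_append]
        have hlen2 : ((cs.drop p).take (iN - p)).length = iN - p := by
          rw [List.length_take, List.length_drop]
          omega
        rw [hlen2]
        have hnohit : pvRef c (fun n => decide (n ∈ i :: rest)) p ((cs.drop p).take (iN - p))
            = (cs.drop p).take (iN - p) := by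
          apply pvRef_no_hits
          intro m h1 h2
          rw [hlen2] at h2
          simp only [decide_eq_false_iff_not, List.mem_cons]
          rintro (rfl | hm)
          · omega
          · have := hrestgt _ hm; omega
        rw [hnohit]
        have hpiN : p + (iN - p) = iN := by omega
        rw [hpiN]
        have hhit : pvRef c (fun n => decide (n ∈ i :: rest)) iN [cs[iN]]
            = cs[iN] :: c := by
          simp only [pvRef]
          have : ((iN : Int) ∈ i :: rest) := by simp [List.mem_cons]; left; omega
          simp [this]
        rw [hhit]
        simp
      rw [hseg]
      -- the tail: membership in i :: rest agrees with membership in rest beyond iN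
      have htail : pvRef c (fun n => decide (n ∈ rest)) (iN + 1) (cs.drop (iN + 1))
          = pvRef c (fun n => decide (n ∈ i :: rest)) (iN + 1) (cs.drop (iN + 1)) := by
        apply pvRef_congr
        intro m h1 h2
        simp only [decide_eq_decide, List.mem_cons]
        constructor
        · intro h; exact Or.inr h
        · rintro (rfl | h)
          · omega
          · exact h
      rw [htail, hslice]
      simp [List.append_assoc]

-- ===== VERDICT (by name: the statement is the Claim_ definition above) =====
theorem add_char_spec : Claim_equal_add_char := by
  intro s c ind_lst _
  unfold Spec_add_char add_char add_char_alt
  have hA := pvA_loop s.toList c.toList (fun j => ind_lst.contains j) s.toList.length 0 []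
    (by omega)
  simp only [PySem.Str.len_eq, Nat.cast_zero] at hA ⊢
  rw [hA]
  set idxs := PySem.List.sorted
      (PySem.Set.ofList (ind_lst.filter (fun i => decide (0 ≤ i ∧ i < (s.toList.length : Int)))))
      (fun x => x) false with hidxs
  have hpw : idxs.Pairwise (· < ·) := PySem.List.sorted_ofList_pairwise_lt _
  have hmem : ∀ j : Int, j ∈ idxs ↔ (j ∈ ind_lst ∧ 0 ≤ j ∧ j < (s.toList.length : Int)) := by
    intro j
    rw [hidxs, PySem.List.mem_sorted, PySem.Set.mem_ofList, List.mem_filter]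
    simp
  have hB := pvB_loop s.toList c.toList idxs 0 [] hpw
    (by intro j hj; have := (hmem j).mp hj; exact ⟨by omega, this.2.2⟩)
  simp only [Nat.cast_zero] at hB
  rw [hB]
  simp only [List.drop_zero, List.nil_append]
  congr 1
  apply pvRef_congr
  intro m h1 h2
  simp only [List.contains_eq_mem, decide_eq_decide]
  rw [hmem]
  simp only [Nat.zero_add] at h2
  constructor
  · intro h; exact ⟨h, by omega, by exact_mod_cast h2⟩
  · intro h; exact h.1
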